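-- pv_equiv track=rewrite | github.com/deeptechhouse/dayton-interactive-map | backend/app/data_import/import_zoning.py | _classify_zone
-- ===== SOURCE A (Python) =====
-- _ZONE_CLASS_MAP = {
--     # Chicago prefixes
--     "M": "manufacturing",
--     "PMD": "manufacturing",
--     "C": "commercial",
--     "B": "commercial",
--     "R": "residential",
--     "RT": "residential",
--     "RS": "residential",
--     "RM": "residential",
--     "DX": "mixed",
--     "DC": "mixed",
--     "DR": "mixed",
--     "DS": "mixed",
--     "PD": "special",
--     "POS": "special",
--     "T": "transportation",
--     "P": "special",
--     # Dayton prefixes (Dayton Zoning Code)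
--     "MF": "residential",       # multi-family
--     "SF": "residential",       # single-family
--     "TF": "residential",       # two-family
--     "UR": "residential",       # urban residential
--     "NC": "commercial",        # neighborhood commercial
--     "GC": "commercial",        # general commercial
--     "RC": "commercial",        # regional commercial
--     "OC": "commercial",        # office commercial
--     "LM": "manufacturing",     # light manufacturing
--     "GM": "manufacturing",     # general manufacturing
--     "HM": "manufacturing",     # heavy manufacturing
--     "MU": "mixed",             # mixed use
--     "MX": "mixed",             # mixed use
--     "CBD": "mixed",            # central business district
--     "WR": "mixed",             # waterfront/river
--     "OS": "special",           # open space
--     "IN": "manufacturing",     # industrial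
--     "I": "manufacturing",      # industrial
-- }
--
-- def _classify_zone(zone_code: str) -> str:
--     """Map a zone code to a broad zone_class. Handles Chicago and Dayton conventions."""
--     if not zone_code:
--         return "other"
--     code = zone_code.strip().upper()
--     # Try longest prefix first
--     for prefix in sorted(_ZONE_CLASS_MAP, key=len, reverse=True):
--         if code.startswith(prefix):
--             return _ZONE_CLASS_MAP[prefix]
--     return "other"
-- ===== SOURCE B (Python) =====
-- def _classify_zone(zone_code: str) -> str:
--     """Map a zone code to a broad zone_class. Handles Chicago and Dayton conventions."""
--     if not zone_code:
--         return "other"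
--     code = zone_code.strip().upper()
--     p3, p2, p1 = code[:3], code[:2], code[:1]
--     # inverted table: longest prefixes first, grouped by the class they map to
--     if p3 == "PMD":
--         return "manufacturing"
--     if p3 == "POS":
--         return "special"
--     if p3 == "CBD":
--         return "mixed"
--     if p2 in ("RT", "RS", "RM", "MF", "SF", "TF", "UR"):
--         return "residential"
--     if p2 in ("DX", "DC", "DR", "DS", "MU", "MX", "WR"):
--         return "mixed"
--     if p2 in ("NC", "GC", "RC", "OC"):
--         return "commercial"
--     if p2 in ("LM", "GM", "HM", "IN"):
--         return "manufacturing"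
--     if p2 in ("PD", "OS"):
--         return "special"
--     if p1 in ("M", "I"):
--         return "manufacturing"
--     if p1 in ("C", "B"):
--         return "commercial"
--     if p1 == "R":
--         return "residential"
--     if p1 == "T":
--         return "transportation"
--     if p1 == "P":
--         return "special"
--     return "other"
-- ===== Notes on version B (the rewrite author's own statement) =====
-- stated objective: alternative
-- what changed: Drops the prefix dict and A's per-call sort-and-startswith scan: B tests the 3-, 2- and 1-character prefixes directly against an inverted comparison chain (classes grouped by prefix length), longest first.
import Mathlib
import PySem

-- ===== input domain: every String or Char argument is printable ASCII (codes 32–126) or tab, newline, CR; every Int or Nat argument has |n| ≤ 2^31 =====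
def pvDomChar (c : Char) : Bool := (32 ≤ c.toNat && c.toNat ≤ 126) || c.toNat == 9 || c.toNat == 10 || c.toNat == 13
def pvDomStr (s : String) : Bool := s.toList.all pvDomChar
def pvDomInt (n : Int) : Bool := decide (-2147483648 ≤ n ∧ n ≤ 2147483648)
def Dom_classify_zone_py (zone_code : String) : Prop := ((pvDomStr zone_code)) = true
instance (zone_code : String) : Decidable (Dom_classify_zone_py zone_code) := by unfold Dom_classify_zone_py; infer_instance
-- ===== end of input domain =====

-- B drops the prefix dict and A's per-call sort-and-startswith scan entirely: it tests the
-- 3-, 2- and 1-character prefixes directly against an inverted table (class -> prefixes),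
-- longest first, as a plain comparison chain.

-- ===== PORT A =====
-- _ZONE_CLASS_MAP (module constant of A); str keys as code-point lists
def zoneClassMap : PySem.Dict (List Char) String := PySem.Dict.ofList
  [ (['M'], "manufacturing")
  , (['P','M','D'], "manufacturing")
  , (['C'], "commercial")
  , (['B'], "commercial")
  , (['R'], "residential")
  , (['R','T'], "residential")
  , (['R','S'], "residential")
  , (['R','M'], "residential")
  , (['D','X'], "mixed")
  , (['D','C'], "mixed")
  , (['D','R'], "mixed")
  , (['D','S'], "mixed")
  , (['P','D'], "special")
  , (['P','O','S'], "special")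
  , (['T'], "transportation")
  , (['P'], "special")
  , (['M','F'], "residential")
  , (['S','F'], "residential")
  , (['T','F'], "residential")
  , (['U','R'], "residential")
  , (['N','C'], "commercial")
  , (['G','C'], "commercial")
  , (['R','C'], "commercial")
  , (['O','C'], "commercial")
  , (['L','M'], "manufacturing")
  , (['G','M'], "manufacturing")
  , (['H','M'], "manufacturing")
  , (['M','U'], "mixed")
  , (['M','X'], "mixed")
  , (['C','B','D'], "mixed")
  , (['W','R'], "mixed")
  , (['O','S'], "special")
  , (['I','N'], "manufacturing")
  , (['I'], "manufacturing") ]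

-- A's 'for prefix in sorted(_ZONE_CLASS_MAP, key=len, reverse=True): if code.startswith(prefix): return _ZONE_CLASS_MAP[prefix]'
-- (the 'none' branch of the lookup is unreachable: prefix is drawn from the map's own keys)
def zoneLoopA (code : List Char) : List (List Char) → String
  | [] => "other"
  | p :: rest =>
      if PySem.Chars.startswith code p then
        match zoneClassMap.get? p with
        | some v => v
        | none => ""
      else zoneLoopA code rest

def classify_zone_py (zone_code : String) : String :=
  if PySem.Str.len zone_code = 0 then "other"
  else
    let code := (PySem.Str.upper (PySem.Str.strip zone_code)).toList
    zoneLoopA code (PySem.List.sorted zoneClassMap.keys (fun k => k.length) true)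

-- ===== PORT B =====
-- B's chain: the three 3-char codes, then 'p2 in (…)' per class (Python tuple membership,
-- ported as List.contains), then the 1-char codes
def classify_zone_py_alt (zone_code : String) : String :=
  if PySem.Str.len zone_code = 0 then "other"
  else
    let code := (PySem.Str.upper (PySem.Str.strip zone_code)).toList
    let p3 := PySem.List.slice code none (some 3)
    let p2 := PySem.List.slice code none (some 2)
    let p1 := PySem.List.slice code none (some 1)
    if p3 == ['P','M','D'] then "manufacturing"
    else if p3 == ['P','O','S'] then "special"
    else if p3 == ['C','B','D'] then "mixed"
    else if [['R','T'],['R','S'],['R','M'],['M','F'],['S','F'],['T','F'],['U','R']].contains p2 then "residential"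
    else if [['D','X'],['D','C'],['D','R'],['D','S'],['M','U'],['M','X'],['W','R']].contains p2 then "mixed"
    else if [['N','C'],['G','C'],['R','C'],['O','C']].contains p2 then "commercial"
    else if [['L','M'],['G','M'],['H','M'],['I','N']].contains p2 then "manufacturing"
    else if [['P','D'],['O','S']].contains p2 then "special"
    else if [['M'],['I']].contains p1 then "manufacturing"
    else if [['C'],['B']].contains p1 then "commercial"
    else if p1 == ['R'] then "residential"
    else if p1 == ['T'] then "transportation"
    else if p1 == ['P'] then "special"
    else "other"

-- ===== PRECONDITION & SPEC =====
def Spec_classify_zone_py (zone_code : String) (out : String) : Prop := out = classify_zone_py_alt zone_code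
instance (zone_code : String) (out : String) : Decidable (Spec_classify_zone_py zone_code out) := by unfold Spec_classify_zone_py; infer_instance

-- ===== CLAIM (what is proved, stated in full; the proofs are below) =====
def Claim_equal_classify_zone_py : Prop := ∀ (zone_code : String), Dom_classify_zone_py zone_code → Spec_classify_zone_py zone_code (classify_zone_py zone_code)

-- ===== LEMMAS AND PROOFS =====

-- the map's items grouped by key length (in insertion order)
def ks3 : List (List Char × String) :=
  [ (['P','M','D'], "manufacturing")
  , (['P','O','S'], "special")
  , (['C','B','D'], "mixed") ]

def ks2 : List (List Char × String) :=
  [ (['R','T'], "residential")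
  , (['R','S'], "residential")
  , (['R','M'], "residential")
  , (['D','X'], "mixed")
  , (['D','C'], "mixed")
  , (['D','R'], "mixed")
  , (['D','S'], "mixed")
  , (['P','D'], "special")
  , (['M','F'], "residential")
  , (['S','F'], "residential")
  , (['T','F'], "residential")
  , (['U','R'], "residential")
  , (['N','C'], "commercial")
  , (['G','C'], "commercial")
  , (['R','C'], "commercial")
  , (['O','C'], "commercial")
  , (['L','M'], "manufacturing")
  , (['G','M'], "manufacturing")
  , (['H','M'], "manufacturing")
  , (['M','U'], "mixed")
  , (['M','X'], "mixed")
  , (['W','R'], "mixed")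
  , (['O','S'], "special")
  , (['I','N'], "manufacturing") ]

def ks1 : List (List Char × String) :=
  [ (['M'], "manufacturing")
  , (['C'], "commercial")
  , (['B'], "commercial")
  , (['R'], "residential")
  , (['T'], "transportation")
  , (['P'], "special")
  , (['I'], "manufacturing") ]

-- the longest-prefix result as three lookups of take-prefixes (proof-only normal form)
def lookA (cs : List Char) : String :=
  ((PySem.Dict.mk ks3).get? (cs.take 3)).elim
    (((PySem.Dict.mk ks2).get? (cs.take 2)).elim
      (((PySem.Dict.mk ks1).get? (cs.take 1)).elim "other" id) id) id

-- the per-call sort of A, evaluated once: key groups in descending length, each stably in insertion order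
lemma sortedKeys_eq : PySem.List.sorted zoneClassMap.keys (fun k => k.length) true =
    ks3.map Prod.fst ++ (ks2.map Prod.fst ++ (ks1.map Prod.fst ++ [])) := by decide

-- a dict whose keys all have a length other than the probe's never answers
lemma get?_none_len (l : List (List Char × String)) (x : List Char)
    (h : ∀ p ∈ l, p.1.length ≠ x.length) : (PySem.Dict.mk l).get? x = none := by
  induction l with
  | nil => rfl
  | cons p t ih =>
    rw [PySem.Dict.get?_mk_cons, if_neg, ih (fun q hq => h q (by simp [hq]))]
    intro hb
    exact h p (by simp) (by rw [(beq_iff_eq).mp hb])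

-- keys longer than the code never match: A's loop skips them
lemma skip_all (cs : List Char) (ks rest : List (List Char))
    (h : ∀ k ∈ ks, cs.length < k.length) :
    zoneLoopA cs (ks ++ rest) = zoneLoopA cs rest := by
  induction ks with
  | nil => rfl
  | cons k t ih =>
    rw [List.cons_append, zoneLoopA, if_neg, ih (fun k hk => h k (by simp [hk]))]
    intro hsw
    exact absurd (((PySem.Chars.startswith_iff cs k).mp hsw).length_le) (by have := h k (by simp); omega)

-- A's scan over one length group of keys is exactly one lookup of that prefix
lemma group_loop (cs : List Char) (n : Nat)
    (ks : List (List Char × String)) (rest : List (List Char))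
    (hlen : ∀ p ∈ ks, p.1.length = n)
    (hvals : ∀ p ∈ ks, zoneClassMap.get? p.1 = some p.2) :
    zoneLoopA cs (ks.map Prod.fst ++ rest) =
      ((PySem.Dict.mk ks).get? (cs.take n)).elim (zoneLoopA cs rest) id := by
  induction ks with
  | nil => rfl
  | cons p t ih =>
    rw [List.map_cons, List.cons_append, zoneLoopA, PySem.Dict.get?_mk_cons]
    have hp1 : p.1.length = n := hlen p (by simp)
    by_cases h : PySem.Chars.startswith cs p.1
    · have hpre : p.1 <+: cs := (PySem.Chars.startswith_iff cs p.1).mp h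
      have heq : p.1 = cs.take n := by
        conv_lhs => rw [List.prefix_iff_eq_take.mp hpre]
        rw [hp1]
      rw [if_pos h, hvals p (by simp), if_pos (by simpa using heq)]
      rfl
    · have hne : ¬ (p.1 == cs.take n) = true := by
        intro hbe
        apply h
        rw [PySem.Chars.startswith_iff]
        have : p.1 = cs.take n := (beq_iff_eq).mp hbe
        rw [this]
        exact List.take_prefix n cs
      rw [if_neg h, if_neg hne, ih (fun q hq => hlen q (by simp [hq])) (fun q hq => hvals q (by simp [hq]))]

-- A's sorted scan is the three-lookup normal form
lemma core_A (cs : List Char) :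
    zoneLoopA cs (PySem.List.sorted zoneClassMap.keys (fun k => k.length) true) = lookA cs := by
  rw [sortedKeys_eq]
  unfold lookA
  match cs with
  | [] => decide
  | [a] =>
    rw [skip_all _ _ _ (by intro k hk; fin_cases hk <;> simp),
        skip_all _ _ _ (by intro k hk; fin_cases hk <;> simp),
        group_loop _ 1 ks1 [] (by decide) (by decide),
        get?_none_len ks3 _ (by intro p hp; fin_cases hp <;> simp),
        get?_none_len ks2 _ (by intro p hp; fin_cases hp <;> simp)]
    rfl
  | [a, b] =>
    rw [skip_all _ _ _ (by intro k hk; fin_cases hk <;> simp),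
        group_loop _ 2 ks2 _ (by decide) (by decide),
        group_loop _ 1 ks1 [] (by decide) (by decide),
        get?_none_len ks3 _ (by intro p hp; fin_cases hp <;> simp)]
    rfl
  | a :: b :: c :: r =>
    rw [group_loop _ 3 ks3 _ (by decide) (by decide),
        group_loop _ 2 ks2 _ (by decide) (by decide),
        group_loop _ 1 ks1 [] (by decide) (by decide)]
    rfl

-- B's comparison chain on the take-prefixes (proof-only; B's body after the slices)
def treeB (cs : List Char) : String :=
    if cs.take 3 == ['P','M','D'] then "manufacturing"
    else if cs.take 3 == ['P','O','S'] then "special"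
    else if cs.take 3 == ['C','B','D'] then "mixed"
    else if [['R','T'],['R','S'],['R','M'],['M','F'],['S','F'],['T','F'],['U','R']].contains (cs.take 2) then "residential"
    else if [['D','X'],['D','C'],['D','R'],['D','S'],['M','U'],['M','X'],['W','R']].contains (cs.take 2) then "mixed"
    else if [['N','C'],['G','C'],['R','C'],['O','C']].contains (cs.take 2) then "commercial"
    else if [['L','M'],['G','M'],['H','M'],['I','N']].contains (cs.take 2) then "manufacturing"
    else if [['P','D'],['O','S']].contains (cs.take 2) then "special"
    else if [['M'],['I']].contains (cs.take 1) then "manufacturing"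
    else if [['C'],['B']].contains (cs.take 1) then "commercial"
    else if cs.take 1 == ['R'] then "residential"
    else if cs.take 1 == ['T'] then "transportation"
    else if cs.take 1 == ['P'] then "special"
    else "other"

-- '{}' answers nothing (tail case of the get? chains below)
lemma get?_nil (x : List Char) : (PySem.Dict.mk ([] : List (List Char × String))).get? x = none := rfl

-- the heart of the equivalence: the lookup normal form equals B's chain on every code
-- (case split on how many leading characters exist, then on the first character)
set_option maxHeartbeats 2000000 in
set_option maxRecDepth 8192 in
lemma bridge (cs : List Char) : lookA cs = treeB cs := by
  unfold lookA treeB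
  match cs with
  | [] => decide
  | [a] =>
    simp only [ks1, ks2, ks3, PySem.Dict.get?_mk_cons, List.take, List.contains_cons, List.contains_nil]
    simp [get?_nil]
    try (split_ifs <;> simp_all <;> simp_all [eq_comm])
  | [a, b] =>
    simp only [ks1, ks2, ks3, PySem.Dict.get?_mk_cons, List.take, List.contains_cons, List.contains_nil]
    by_cases hM : a = 'M'
    · subst hM
      simp [get?_nil]
      try (split_ifs <;> simp_all <;> simp_all [eq_comm])
    by_cases hP : a = 'P'
    · subst hP
      simp [get?_nil]
      try (split_ifs <;> simp_all <;> simp_all [eq_comm])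
    by_cases hC : a = 'C'
    · subst hC
      simp [get?_nil]
      try (split_ifs <;> simp_all <;> simp_all [eq_comm])
    by_cases hB : a = 'B'
    · subst hB
      simp [get?_nil]
      try (split_ifs <;> simp_all <;> simp_all [eq_comm])
    by_cases hR : a = 'R'
    · subst hR
      simp [get?_nil]
      try (split_ifs <;> simp_all <;> simp_all [eq_comm])
    by_cases hD : a = 'D'
    · subst hD
      simp [get?_nil]
      try (split_ifs <;> simp_all <;> simp_all [eq_comm])
    by_cases hT : a = 'T'
    · subst hT
      simp [get?_nil]
      try (split_ifs <;> simp_all <;> simp_all [eq_comm])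
    by_cases hS : a = 'S'
    · subst hS
      simp [get?_nil]
      try (split_ifs <;> simp_all <;> simp_all [eq_comm])
    by_cases hU : a = 'U'
    · subst hU
      simp [get?_nil]
      try (split_ifs <;> simp_all <;> simp_all [eq_comm])
    by_cases hN : a = 'N'
    · subst hN
      simp [get?_nil]
      try (split_ifs <;> simp_all <;> simp_all [eq_comm])
    by_cases hG : a = 'G'
    · subst hG
      simp [get?_nil]
      try (split_ifs <;> simp_all <;> simp_all [eq_comm])
    by_cases hO : a = 'O'
    · subst hO
      simp [get?_nil]
      try (split_ifs <;> simp_all <;> simp_all [eq_comm])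
    by_cases hL : a = 'L'
    · subst hL
      simp [get?_nil]
      try (split_ifs <;> simp_all <;> simp_all [eq_comm])
    by_cases hH : a = 'H'
    · subst hH
      simp [get?_nil]
      try (split_ifs <;> simp_all <;> simp_all [eq_comm])
    by_cases hW : a = 'W'
    · subst hW
      simp [get?_nil]
      try (split_ifs <;> simp_all <;> simp_all [eq_comm])
    by_cases hI : a = 'I'
    · subst hI
      simp [get?_nil]
      try (split_ifs <;> simp_all <;> simp_all [eq_comm])
    have hM' : 'M' ≠ a := fun e => hM e.symm
    have hP' : 'P' ≠ a := fun e => hP e.symm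
    have hC' : 'C' ≠ a := fun e => hC e.symm
    have hB' : 'B' ≠ a := fun e => hB e.symm
    have hR' : 'R' ≠ a := fun e => hR e.symm
    have hD' : 'D' ≠ a := fun e => hD e.symm
    have hT' : 'T' ≠ a := fun e => hT e.symm
    have hS' : 'S' ≠ a := fun e => hS e.symm
    have hU' : 'U' ≠ a := fun e => hU e.symm
    have hN' : 'N' ≠ a := fun e => hN e.symm
    have hG' : 'G' ≠ a := fun e => hG e.symm
    have hO' : 'O' ≠ a := fun e => hO e.symm
    have hL' : 'L' ≠ a := fun e => hL e.symm
    have hH' : 'H' ≠ a := fun e => hH e.symm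
    have hW' : 'W' ≠ a := fun e => hW e.symm
    have hI' : 'I' ≠ a := fun e => hI e.symm
    simp [get?_nil, hM, hP, hC, hB, hR, hD, hT, hS, hU, hN, hG, hO, hL, hH, hW, hI, hM', hP', hC', hB', hR', hD', hT', hS', hU', hN', hG', hO', hL', hH', hW', hI']
  | a :: b :: c :: r =>
    simp only [ks1, ks2, ks3, PySem.Dict.get?_mk_cons, List.take, List.contains_cons, List.contains_nil]
    by_cases hM : a = 'M'
    · subst hM
      simp [get?_nil]
      try (split_ifs <;> simp_all <;> simp_all [eq_comm])
    by_cases hP : a = 'P'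
    · subst hP
      simp [get?_nil]
      try (split_ifs <;> simp_all <;> simp_all [eq_comm])
    by_cases hC : a = 'C'
    · subst hC
      simp [get?_nil]
      try (split_ifs <;> simp_all <;> simp_all [eq_comm])
    by_cases hB : a = 'B'
    · subst hB
      simp [get?_nil]
      try (split_ifs <;> simp_all <;> simp_all [eq_comm])
    by_cases hR : a = 'R'
    · subst hR
      simp [get?_nil]
      try (split_ifs <;> simp_all <;> simp_all [eq_comm])
    by_cases hD : a = 'D'
    · subst hD
      simp [get?_nil]
      try (split_ifs <;> simp_all <;> simp_all [eq_comm])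
    by_cases hT : a = 'T'
    · subst hT
      simp [get?_nil]
      try (split_ifs <;> simp_all <;> simp_all [eq_comm])
    by_cases hS : a = 'S'
    · subst hS
      simp [get?_nil]
      try (split_ifs <;> simp_all <;> simp_all [eq_comm])
    by_cases hU : a = 'U'
    · subst hU
      simp [get?_nil]
      try (split_ifs <;> simp_all <;> simp_all [eq_comm])
    by_cases hN : a = 'N'
    · subst hN
      simp [get?_nil]
      try (split_ifs <;> simp_all <;> simp_all [eq_comm])
    by_cases hG : a = 'G'
    · subst hG
      simp [get?_nil]
      try (split_ifs <;> simp_all <;> simp_all [eq_comm])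
    by_cases hO : a = 'O'
    · subst hO
      simp [get?_nil]
      try (split_ifs <;> simp_all <;> simp_all [eq_comm])
    by_cases hL : a = 'L'
    · subst hL
      simp [get?_nil]
      try (split_ifs <;> simp_all <;> simp_all [eq_comm])
    by_cases hH : a = 'H'
    · subst hH
      simp [get?_nil]
      try (split_ifs <;> simp_all <;> simp_all [eq_comm])
    by_cases hW : a = 'W'
    · subst hW
      simp [get?_nil]
      try (split_ifs <;> simp_all <;> simp_all [eq_comm])
    by_cases hI : a = 'I'
    · subst hI
      simp [get?_nil]
      try (split_ifs <;> simp_all <;> simp_all [eq_comm])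
    have hM' : 'M' ≠ a := fun e => hM e.symm
    have hP' : 'P' ≠ a := fun e => hP e.symm
    have hC' : 'C' ≠ a := fun e => hC e.symm
    have hB' : 'B' ≠ a := fun e => hB e.symm
    have hR' : 'R' ≠ a := fun e => hR e.symm
    have hD' : 'D' ≠ a := fun e => hD e.symm
    have hT' : 'T' ≠ a := fun e => hT e.symm
    have hS' : 'S' ≠ a := fun e => hS e.symm
    have hU' : 'U' ≠ a := fun e => hU e.symm
    have hN' : 'N' ≠ a := fun e => hN e.symm
    have hG' : 'G' ≠ a := fun e => hG e.symm
    have hO' : 'O' ≠ a := fun e => hO e.symm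
    have hL' : 'L' ≠ a := fun e => hL e.symm
    have hH' : 'H' ≠ a := fun e => hH e.symm
    have hW' : 'W' ≠ a := fun e => hW e.symm
    have hI' : 'I' ≠ a := fun e => hI e.symm
    simp [get?_nil, hM, hP, hC, hB, hR, hD, hT, hS, hU, hN, hG, hO, hL, hH, hW, hI, hM', hP', hC', hB', hR', hD', hT', hS', hU', hN', hG', hO', hL', hH', hW', hI']


-- ===== VERDICT (by name: the statement is the Claim_ definition above) =====
theorem classify_zone_py_spec : Claim_equal_classify_zone_py := by
  intro zone_code _
  unfold Spec_classify_zone_py classify_zone_py classify_zone_py_alt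
  by_cases h : PySem.Str.len zone_code = 0
  · rw [if_pos h, if_pos h]
  · rw [if_neg h, if_neg h]
    simp only [Nat.ofNat_nonneg, zero_le_one, PySem.List.slice_to, Int.reduceToNat, Int.toNat_one]
    rw [core_A, bridge]
    rfl
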